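-- pv_equiv track=rewrite | github.com/jerrt2003/leetcode-in-python | live-interview-feedback/Google/getAllStrCombo/Sol2.py | getAllCombo
-- ===== SOURCE A (Python) =====
-- def getAllCombo(str):
--     def insideBracket(str, i):
--         res = ['']
--         cache = ''
--         while i < len(str):
--             if str[i] == '}':
--                 res = [a+b for a in res for b in cache.split(',')]
--                 return res, i+1
--             elif str[i] == '{':
--                 if cache is not None:
--                     res = [a+cache for a in res]
--                     cache = ''
--                 sub_str, i = insideBracket(str, i+1)
--                 res = [a+b for a in res for b in sub_str]
--             else:
--                 cache += str[i]
--                 i += 1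
--
--     i = 0
--     res = ['']
--     while i < len(str):
--         if str[i] == '{':
--             sub_str, i = insideBracket(str, i+1)
--             res = [a+b for a in res for b in sub_str]
--         else:
--             res = [a+str[i] for a in res]
--             i += 1
--     return res
-- ===== SOURCE B (Python) =====
-- def getAllCombo(str):
--     # Iterative re-implementation: explicit stack of (res, cache) frames instead of recursion.
--     out = ['']
--     stack = []
--     for c in str:
--         if c == '{':
--             if stack:
--                 fr = stack[-1]
--                 fr[0] = [a + fr[1] for a in fr[0]]
--                 fr[1] = ''
--             stack.append([[''], ''])
--         elif c == '}' and stack: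
--             res, cache = stack.pop()
--             sub = [a + b for a in res for b in cache.split(',')]
--             if stack:
--                 fr = stack[-1]
--                 fr[0] = [a + b for a in fr[0] for b in sub]
--             else:
--                 out = [a + b for a in out for b in sub]
--         elif stack:
--             stack[-1][1] += c
--         else:
--             out = [a + c for a in out]
--     return out
-- ===== Notes on version B (the rewrite author's own statement) =====
-- stated objective: alternative
-- what changed: Replaces the recursive-descent helper insideBracket with a single left-to-right pass over the string driving an explicit stack of (res, cache) frames, reproducing the original's flush/split behaviour exactly.
-- outside the precondition, e.g. on getAllCombo('{'): A raises TypeError, B returns ['']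
import Mathlib
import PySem

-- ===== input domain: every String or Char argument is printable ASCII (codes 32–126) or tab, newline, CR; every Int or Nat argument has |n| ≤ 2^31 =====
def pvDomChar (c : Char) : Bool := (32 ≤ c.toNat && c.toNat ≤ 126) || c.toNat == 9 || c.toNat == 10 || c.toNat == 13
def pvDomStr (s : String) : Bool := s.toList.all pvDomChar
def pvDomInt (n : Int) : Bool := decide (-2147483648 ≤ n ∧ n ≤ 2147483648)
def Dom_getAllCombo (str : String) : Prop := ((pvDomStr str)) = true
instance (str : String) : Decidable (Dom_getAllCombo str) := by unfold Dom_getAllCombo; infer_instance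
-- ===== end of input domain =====

-- B replaces A's recursive-descent helper with a single pass driving an explicit stack of
-- (res, cache) frames (same cost; objective: alternative decomposition).


-- cache.split(',') — sep nonempty, so split? is always some
def pvSplitComma (s : String) : List String := (PySem.Str.split? s ",").getD []

-- shared helper: the list comprehension [a+b for a in res for b in sub], used verbatim by both Pythons
def pvCross (res sub : List String) : List String :=
  res.flatMap (fun a => sub.map (fun b => a ++ b))

-- ===== PORT A =====
-- inner helper insideBracket: returns none where the Python returns None / falls off the end
-- (unpacking None raises TypeError in A).  fuel only makes the recursion total; it is never
-- exhausted on inputs satisfying Pre_.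
def pvInsideA : Nat → List String → String → List Char → Option (List String × List Char)
  | 0, _, _, _ => none
  | _ + 1, _, _, [] => none
  | fuel + 1, res, cache, c :: rest =>
    if c = '}' then some (pvCross res (pvSplitComma cache), rest)
    else if c = '{' then
      -- `if cache is not None` is always true in the Python: flush cache unconditionally
      let res' := res.map (fun a => a ++ cache)
      match pvInsideA fuel [""] "" rest with
      | none => none
      | some (sub, rest') => pvInsideA fuel (pvCross res' sub) "" rest'
    else pvInsideA fuel res (cache.push c) rest

def pvGoA : Nat → List String → List Char → Option (List String)
  | 0, _, _ => none
  | _ + 1, res, [] => some res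
  | fuel + 1, res, c :: rest =>
    if c = '{' then
      match pvInsideA fuel [""] "" rest with
      | none => none
      | some (sub, rest') => pvGoA fuel (pvCross res sub) rest'
    else pvGoA fuel (res.map (fun a => a.push c)) rest

def getAllCombo (str : String) : List String :=
  (pvGoA (str.toList.length + 1) [""] str.toList).getD []

-- ===== PORT B =====
-- pop the top frame's result `sub` into the frame below (or into the top-level result)
def pvPop (out : List String) (t : List (List String × String)) (sub : List String) :
    List String × List (List String × String) :=
  match t with
  | [] => (pvCross out sub, [])
  | (r2, c2) :: t2 => (out, (pvCross r2 sub, c2) :: t2)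

def pvStepB (st : List String × List (List String × String)) (c : Char) :
    List String × List (List String × String) :=
  match st with
  | (out, stack) =>
    if c = '{' then
      match stack with
      | [] => (out, ([""], "") :: [])
      | (r, ca) :: t => (out, ([""], "") :: (r.map (fun a => a ++ ca), "") :: t)
    else if c = '}' then
      match stack with
      | [] => (out.map (fun a => a.push c), [])
      | (r, ca) :: t => pvPop out t (pvCross r (pvSplitComma ca))
    else
      match stack with
      | [] => (out.map (fun a => a.push c), [])
      | (r, ca) :: t => (out, (r, ca.push c) :: t)

def getAllCombo_alt (str : String) : List String :=
  (str.toList.foldl pvStepB ([""], [])).1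

-- ===== PRECONDITION & SPEC =====
-- depth scan, '}' at depth 0 is a literal character (clipped)
def pvBal : List Char → Nat → Bool
  | [], d => d == 0
  | c :: cs, d =>
    if c = '{' then pvBal cs (d + 1)
    else if c = '}' then (if d = 0 then pvBal cs 0 else pvBal cs (d - 1))
    else pvBal cs d

-- Pre_ excludes exactly the strings with an unclosed '{': there insideBracket runs off the
-- end and returns None, so A raises TypeError.
def Pre_getAllCombo (str : String) : Prop := pvBal str.toList 0 = true
instance (str : String) : Decidable (Pre_getAllCombo str) := by unfold Pre_getAllCombo; infer_instance

def pvWitness_getAllCombo : String := "{a,b}c"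

def Spec_getAllCombo (str : String) (out : List String) : Prop := out = getAllCombo_alt str
instance (str : String) (out : List String) : Decidable (Spec_getAllCombo str out) := by unfold Spec_getAllCombo; infer_instance

-- ===== CLAIM (what is proved, stated in full; the proofs are below) =====
def Claim_equal_getAllCombo : Prop := ∀ (str : String), Dom_getAllCombo str → Pre_getAllCombo str → Spec_getAllCombo str (getAllCombo str)

-- ===== LEMMAS AND PROOFS =====

-- success of A's machine on balanced input
lemma pvInsideA_success (n : Nat) : ∀ (cs : List Char), cs.length ≤ n → ∀ (d : Nat),
    pvBal cs (d + 1) = true → ∀ (res : List String) (cache : String),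
    ∃ sub rest, pvInsideA (n + 1) res cache cs = some (sub, rest) ∧
      rest.length < cs.length ∧ pvBal rest d = true := by
  induction n with
  | zero =>
    intro cs hlen d hbal res cache
    match cs, hlen with
    | [], _ => simp [pvBal] at hbal
  | succ n ih =>
    intro cs hlen d hbal res cache
    match cs with
    | [] => simp [pvBal] at hbal
    | c :: rest =>
      by_cases hc : c = '}'
      · subst hc
        refine ⟨pvCross res (pvSplitComma cache), rest, by simp [pvInsideA], by simp, ?_⟩
        simpa [pvBal] using hbal
      · by_cases ho : c = '{'
        · subst ho
          simp only [pvBal] at hbal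
          have hlen1 : rest.length ≤ n := by simpa using hlen
          obtain ⟨sub1, rest1, h1, hl1, hb1⟩ := ih rest hlen1 (d + 1) hbal [""] ""
          have hlen2 : rest1.length ≤ n := by omega
          obtain ⟨sub2, rest2, h2, hl2, hb2⟩ :=
            ih rest1 hlen2 d hb1 (pvCross (res.map (fun a => a ++ cache)) sub1) ""
          refine ⟨sub2, rest2, ?_, by simp; omega, hb2⟩
          simp only [pvInsideA, if_neg (show ¬('{' = '}') by decide)]
          rw [h1]
          exact h2
        · simp only [pvBal, if_neg ho, if_neg hc] at hbal
          have hlen1 : rest.length ≤ n := by simpa using hlen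
          obtain ⟨sub1, rest1, h1, hl1, hb1⟩ := ih rest hlen1 d hbal res (cache.push c)
          refine ⟨sub1, rest1, ?_, by simp; omega, hb1⟩
          simp only [pvInsideA, if_neg hc, if_neg ho]
          exact h1

lemma pvGoA_success (n : Nat) : ∀ (cs : List Char), cs.length ≤ n →
    pvBal cs 0 = true → ∀ (res : List String),
    ∃ r, pvGoA (n + 1) res cs = some r := by
  induction n with
  | zero =>
    intro cs hlen _ res
    match cs, hlen with
    | [], _ => exact ⟨res, rfl⟩
  | succ n ih =>
    intro cs hlen hbal res
    match cs with
    | [] => exact ⟨res, rfl⟩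
    | c :: rest =>
      have hlen1 : rest.length ≤ n := by simpa using hlen
      by_cases ho : c = '{'
      · subst ho
        simp only [pvBal] at hbal
        obtain ⟨sub1, rest1, h1, hl1, hb1⟩ := pvInsideA_success n rest hlen1 0 hbal [""] ""
        obtain ⟨r, hr⟩ := ih rest1 (by omega) hb1 (pvCross res sub1)
        refine ⟨r, ?_⟩
        simp only [pvGoA]
        rw [h1]
        exact hr
      · have hbal' : pvBal rest 0 = true := by
          by_cases hc : c = '}'
          · subst hc; simpa [pvBal] using hbal
          · simpa [pvBal, ho, hc] using hbal
        obtain ⟨r, hr⟩ := ih rest hlen1 hbal' (res.map (fun a => a.push c))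
        refine ⟨r, ?_⟩
        simp only [pvGoA, if_neg ho]
        exact hr

-- simulation: A's insideBracket against B's stack machine
lemma pvSim_inner : ∀ (fuel : Nat) (cs : List Char) (res : List String) (cache : String)
    (sub : List String) (rest : List Char),
    pvInsideA fuel res cache cs = some (sub, rest) →
    ∀ (out : List String) (t : List (List String × String)),
    List.foldl pvStepB (out, (res, cache) :: t) cs = List.foldl pvStepB (pvPop out t sub) rest := by
  intro fuel
  induction fuel with
  | zero => intro cs res cache sub rest h; simp [pvInsideA] at h
  | succ fuel ih =>
    intro cs res cache sub rest h out t
    match cs with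
    | [] => simp [pvInsideA] at h
    | c :: cs' =>
      by_cases hc : c = '}'
      · subst hc
        simp only [pvInsideA] at h
        obtain ⟨hsub, hrest⟩ := Prod.mk.injEq .. ▸ Option.some.injEq .. ▸ h
        subst hsub hrest
        simp [List.foldl, pvStepB]
      · by_cases ho : c = '{'
        · subst ho
          simp only [pvInsideA, if_neg (show ¬('{' = '}') by decide)] at h
          cases h1 : pvInsideA fuel [""] "" cs' with
          | none => rw [h1] at h; simp at h
          | some p =>
            obtain ⟨sub1, rest1⟩ := p
            rw [h1] at h
            simp only at h
            have step : List.foldl pvStepB (out, (res, cache) :: t) ('{' :: cs') =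
                List.foldl pvStepB
                  (out, ([""], "") :: (res.map (fun a => a ++ cache), "") :: t) cs' := by
              simp [List.foldl, pvStepB]
            rw [step, ih cs' [""] "" sub1 rest1 h1 out ((res.map (fun a => a ++ cache), "") :: t)]
            simpa [pvPop] using
              ih rest1 (pvCross (res.map (fun a => a ++ cache)) sub1) "" sub rest h out t
        · simp only [pvInsideA, if_neg hc, if_neg ho] at h
          have step : List.foldl pvStepB (out, (res, cache) :: t) (c :: cs') =
              List.foldl pvStepB (out, (res, cache.push c) :: t) cs' := by
            simp [List.foldl, pvStepB, hc, ho]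
          rw [step]
          exact ih cs' res (cache.push c) sub rest h out t

lemma pvSim_outer : ∀ (fuel : Nat) (cs : List Char) (res r : List String),
    pvGoA fuel res cs = some r →
    List.foldl pvStepB (res, []) cs = (r, []) := by
  intro fuel
  induction fuel with
  | zero => intro cs res r h; simp [pvGoA] at h
  | succ fuel ih =>
    intro cs res r h
    match cs with
    | [] =>
      simp only [pvGoA, Option.some.injEq] at h
      simp [h]
    | c :: cs' =>
      by_cases ho : c = '{'
      · subst ho
        simp only [pvGoA] at h
        cases h1 : pvInsideA fuel [""] "" cs' with
        | none => rw [h1] at h; simp at h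
        | some p =>
          obtain ⟨sub1, rest1⟩ := p
          rw [h1] at h
          simp only at h
          have step : List.foldl pvStepB (res, []) ('{' :: cs') =
              List.foldl pvStepB (res, [([""], "")]) cs' := by
            simp [List.foldl, pvStepB]
          rw [step, pvSim_inner fuel cs' [""] "" sub1 rest1 h1 res []]
          simpa [pvPop] using ih rest1 (pvCross res sub1) r h
      · simp only [pvGoA, if_neg ho] at h
        have step : List.foldl pvStepB (res, []) (c :: cs') =
            List.foldl pvStepB (res.map (fun a => a.push c), []) cs' := by
          by_cases hc : c = '}'
          · subst hc; simp [List.foldl, pvStepB]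
          · simp [List.foldl, pvStepB, ho, hc]
        rw [step]
        exact ih cs' (res.map (fun a => a.push c)) r h

-- ===== VERDICT (by name: the statement is the Claim_ definition above) =====
theorem getAllCombo_spec : Claim_equal_getAllCombo := by
  intro str _hdom hpre
  unfold Spec_getAllCombo getAllCombo getAllCombo_alt
  obtain ⟨r, hr⟩ :=
    pvGoA_success str.toList.length str.toList le_rfl hpre [""]
  rw [hr, pvSim_outer (str.toList.length + 1) str.toList [""] r hr]
  rfl
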